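-- pv_equiv track=rewrite | github.com/MINSOOKIM777/write-app | blogger_poster.py | _markdown_table_to_html
-- ===== SOURCE A (Python) =====
-- def _is_table_separator(line: str) -> bool:
--     s = line.strip()
--     return bool(s) and all(c in "|-: " for c in s) and "-" in s and "|" in s
--
-- def _markdown_table_to_html(text: str) -> str:
--     """마크다운 표를 HTML 표로 변환. 구분선 없는 표도 처리."""
--     lines = text.split("\n")
--     result = []
--     i = 0
--     while i < len(lines):
--         line = lines[i]
--         # 표 시작 감지: 줄이 |로 시작
--         if line.strip().startswith("|"):
--             # 연속된 | 줄 수집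
--             table_lines = []
--             while i < len(lines) and lines[i].strip().startswith("|"):
--                 table_lines.append(lines[i])
--                 i += 1
--
--             # 구분선 제거
--             rows = [l for l in table_lines if not _is_table_separator(l)]
--             if not rows:
--                 result.extend(table_lines)
--                 continue
--
--             html = '<table style="width:100%;border-collapse:collapse;margin:16px 0;">'
--             # 첫 줄 = 헤더
--             headers = [h.strip() for h in rows[0].strip().strip("|").split("|") if h.strip()]
--             html += "<thead><tr>"
--             for h in headers:
--                 html += f'<th style="border:1px solid #ddd;padding:8px;background:#f5f5f5;text-align:left;">{h}</th>'
--             html += "</tr></thead><tbody>"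
--             for row in rows[1:]:
--                 cells = [c.strip() for c in row.strip().strip("|").split("|")]
--                 html += "<tr>"
--                 for c in cells:
--                     html += f'<td style="border:1px solid #ddd;padding:8px;">{c}</td>'
--                 html += "</tr>"
--             html += "</tbody></table>"
--             result.append(html)
--         else:
--             result.append(line)
--             i += 1
--     return "\n".join(result)
-- ===== SOURCE B (Python) =====
-- # B: builds the output BACK-TO-FRONT: a single right-to-left fold over the lines
-- # with an accumulator (pending-table-run, rendered-tail); tables are rendered by
-- # join-over-comprehensions instead of A's forward index walk with += accumulation.
-- # Objective: alternative decomposition (reverse fold vs forward while-loop).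
--
-- def _is_table_separator(line: str) -> bool:
--     s = line.strip()
--     return bool(s) and all(c in "|-: " for c in s) and "-" in s and "|" in s
--
-- def _cells(row: str) -> list:
--     return [c.strip() for c in row.strip().strip("|").split("|")]
--
-- def _render(block: list) -> list:
--     rows = [l for l in block if not _is_table_separator(l)]
--     if not rows:
--         return block
--     head = "".join(
--         f'<th style="border:1px solid #ddd;padding:8px;background:#f5f5f5;text-align:left;">{h}</th>'
--         for h in _cells(rows[0]) if h
--     )
--     body = "".join(
--         "<tr>"
--         + "".join(f'<td style="border:1px solid #ddd;padding:8px;">{c}</td>' for c in _cells(r))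
--         + "</tr>"
--         for r in rows[1:]
--     )
--     return [
--         '<table style="width:100%;border-collapse:collapse;margin:16px 0;">'
--         + "<thead><tr>" + head + "</tr></thead><tbody>" + body + "</tbody></table>"
--     ]
--
-- def _markdown_table_to_html(text: str) -> str:
--     run, out = [], []          # run: pending table lines (original order); out: finished tail
--     for line in reversed(text.split("\n")):
--         if line.strip().startswith("|"):
--             run = [line] + run
--         else:
--             out = [line] + (_render(run) if run else []) + out
--             run = []
--     return "\n".join((_render(run) if run else []) + out)
-- ===== Notes on version B (the rewrite author's own statement) =====
-- stated objective: alternative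
-- what changed: Replaces A's forward index-driven while-loop (inner collection loop, += string building) by one right-to-left fold that builds the output back-to-front with a (pending-table-run, rendered-tail) accumulator, rendering tables via join over comprehensions.
import Mathlib
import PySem

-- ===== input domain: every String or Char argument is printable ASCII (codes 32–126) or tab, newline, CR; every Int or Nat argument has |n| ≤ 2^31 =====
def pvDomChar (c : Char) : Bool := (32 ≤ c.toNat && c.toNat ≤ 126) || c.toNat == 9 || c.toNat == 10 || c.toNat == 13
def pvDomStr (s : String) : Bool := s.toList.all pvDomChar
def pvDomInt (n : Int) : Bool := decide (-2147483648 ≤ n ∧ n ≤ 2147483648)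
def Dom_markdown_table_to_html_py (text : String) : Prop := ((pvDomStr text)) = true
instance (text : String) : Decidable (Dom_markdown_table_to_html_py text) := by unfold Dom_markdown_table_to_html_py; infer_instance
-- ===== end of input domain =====

-- B builds the output BACK-TO-FRONT: one right-to-left fold over the lines with an
-- accumulator (pending table run, rendered tail), rendering tables via join-of-maps,
-- instead of A's forward index while-loop with inner collection loop and += string
-- accumulation; same output (objective: alternative decomposition).
-- Both ports work on List Char via PySem.Chars (exact on the domain), wrapped by String.mk/toList.

-- shared HTML literals (identical string constants in both Python sources)
def pvTableOpen : List Char := "<table style=\"width:100%;border-collapse:collapse;margin:16px 0;\">".toList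
def pvTheadOpen : List Char := "<thead><tr>".toList
def pvThOpen : List Char := "<th style=\"border:1px solid #ddd;padding:8px;background:#f5f5f5;text-align:left;\">".toList
def pvThClose : List Char := "</th>".toList
def pvTheadClose : List Char := "</tr></thead><tbody>".toList
def pvTrOpen : List Char := "<tr>".toList
def pvTrClose : List Char := "</tr>".toList
def pvTdOpen : List Char := "<td style=\"border:1px solid #ddd;padding:8px;\">".toList
def pvTdClose : List Char := "</td>".toList
def pvTbodyClose : List Char := "</tbody></table>".toList

-- line.strip().startswith("|")  (used by both sources as the table-line test)
def pvTable (l : List Char) : Bool :=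
  PySem.Chars.startswith (PySem.Chars.strip l) ['|']

-- _is_table_separator (same helper in both Python sources)
def pvSep (l : List Char) : Bool :=
  let s := PySem.Chars.strip l
  (!s.isEmpty) && s.all (fun c => PySem.Chars.isIn [c] "|-: ".toList)
    && PySem.Chars.isIn ['-'] s && PySem.Chars.isIn ['|'] s

-- ===== PORT A =====

-- A's inner `while i < len(lines) and lines[i].strip().startswith("|")` collection loop
def pvCollect : List (List Char) → (List (List Char) × List (List Char))
  | [] => ([], [])
  | l :: rest =>
    if pvTable l then
      let p := pvCollect rest
      (l :: p.1, p.2)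
    else ([], l :: rest)

-- termination measure for procA's outer while loop
theorem pvCollect_snd_le (ls : List (List Char)) : (pvCollect ls).2.length ≤ ls.length := by
  induction ls with
  | nil => simp [pvCollect]
  | cons l rest ih =>
    by_cases h : pvTable l = true
    · simpa [pvCollect, h] using Nat.le_succ_of_le ih
    · simp [pvCollect, h]

-- A's inline html building for one table (rows[0] = r0, rows[1:] = rs), += as foldl
def pvTableHtmlA (r0 : List Char) (rs : List (List Char)) : List Char :=
  let headers := ((PySem.Chars.splitOn (PySem.Chars.stripChars (PySem.Chars.strip r0) ['|']) ['|']).filter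
      (fun h => !(PySem.Chars.strip h).isEmpty)).map PySem.Chars.strip
  let html := pvTableOpen ++ pvTheadOpen
  let html := headers.foldl (fun acc h => acc ++ pvThOpen ++ h ++ pvThClose) html
  let html := html ++ pvTheadClose
  let html := rs.foldl (fun acc row =>
      let cells := (PySem.Chars.splitOn (PySem.Chars.stripChars (PySem.Chars.strip row) ['|']) ['|']).map PySem.Chars.strip
      (cells.foldl (fun a c => a ++ pvTdOpen ++ c ++ pvTdClose) (acc ++ pvTrOpen)) ++ pvTrClose) html
  html ++ pvTbodyClose

-- A's outer while loop over the line index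
def pvProcA : List (List Char) → List (List Char)
  | [] => []
  | l :: rest =>
    if pvTable l then
      let tl := l :: (pvCollect rest).1
      let rows := tl.filter (fun x => !pvSep x)
      match rows with
      | [] => tl ++ pvProcA (pvCollect rest).2
      | r0 :: rs => pvTableHtmlA r0 rs :: pvProcA (pvCollect rest).2
    else l :: pvProcA rest
termination_by ls => ls.length
decreasing_by
  all_goals simp only [List.length_cons]
  all_goals first
    | exact Nat.lt_succ_of_le (pvCollect_snd_le rest)
    | omega

def markdown_table_to_html_py (text : String) : String :=
  String.ofList (PySem.Chars.join ['\n'] (pvProcA (PySem.Chars.splitOn text.toList ['\n'])))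

-- ===== PORT B =====

-- _cells(row)
def pvCells (row : List Char) : List (List Char) :=
  (PySem.Chars.splitOn (PySem.Chars.stripChars (PySem.Chars.strip row) ['|']) ['|']).map PySem.Chars.strip

-- _render(block)
def pvRender (block : List (List Char)) : List (List Char) :=
  let rows := block.filter (fun x => !pvSep x)
  match rows with
  | [] => block
  | r0 :: rs =>
    let head := PySem.Chars.join []
      (((pvCells r0).filter (fun h => !h.isEmpty)).map (fun h => pvThOpen ++ h ++ pvThClose))
    let body := PySem.Chars.join [] (rs.map (fun r =>
        pvTrOpen ++ PySem.Chars.join [] ((pvCells r).map (fun c => pvTdOpen ++ c ++ pvTdClose)) ++ pvTrClose))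
    [pvTableOpen ++ pvTheadOpen ++ head ++ pvTheadClose ++ body ++ pvTbodyClose]

-- `(_render(run) if run else []) + out`
def pvFlush (run out : List (List Char)) : List (List Char) :=
  if run.isEmpty then out else pvRender run ++ out

-- one step of the `for line in reversed(...)` loop (run kept in original order:
-- Python's `[line] + run` is cons)
def pvStepB (line : List Char) (st : List (List Char) × List (List Char)) :
    List (List Char) × List (List Char) :=
  if pvTable line then (line :: st.1, st.2)
  else ([], line :: pvFlush st.1 st.2)

def markdown_table_to_html_py_alt (text : String) : String :=
  let st := (PySem.Chars.splitOn text.toList ['\n']).foldr pvStepB ([], [])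
  String.ofList (PySem.Chars.join ['\n'] (pvFlush st.1 st.2))

-- ===== PRECONDITION & SPEC =====
def Spec_markdown_table_to_html_py (text : String) (out : String) : Prop := out = markdown_table_to_html_py_alt text
instance (text : String) (out : String) : Decidable (Spec_markdown_table_to_html_py text out) := by unfold Spec_markdown_table_to_html_py; infer_instance

-- ===== CLAIM (what is proved, stated in full; the proofs are below) =====
def Claim_equal_markdown_table_to_html_py : Prop := ∀ (text : String), Dom_markdown_table_to_html_py text → Spec_markdown_table_to_html_py text (markdown_table_to_html_py text)

-- ===== LEMMAS AND PROOFS =====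

theorem pvCollect_eq (ls : List (List Char)) :
    pvCollect ls = (ls.takeWhile pvTable, ls.dropWhile pvTable) := by
  induction ls with
  | nil => rfl
  | cons l rest ih =>
    by_cases h : pvTable l = true
    · simp [pvCollect, h, ih]
    · simp [pvCollect, h]

theorem pv_join_nil_cons (p : List Char) (ps : List (List Char)) :
    PySem.Chars.join [] (p :: ps) = p ++ PySem.Chars.join [] ps := by
  cases ps with
  | nil => simp [PySem.Chars.join_singleton, PySem.Chars.join_nil]
  | cons q qs => simp [PySem.Chars.join_cons_cons]

theorem pv_join_nil_eq_flatten (ps : List (List Char)) :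
    PySem.Chars.join [] ps = ps.flatten := by
  induction ps with
  | nil => simp [PySem.Chars.join_nil]
  | cons p qs ih => rw [pv_join_nil_cons, ih, List.flatten_cons]

theorem pv_foldl_td (cs : List (List Char)) (s : List Char) :
    cs.foldl (fun a c => a ++ pvTdOpen ++ c ++ pvTdClose) s
      = s ++ PySem.Chars.join [] (cs.map (fun c => pvTdOpen ++ c ++ pvTdClose)) := by
  induction cs generalizing s with
  | nil => simp [PySem.Chars.join_nil]
  | cons x xs ih =>
    simp only [List.foldl_cons, List.map_cons, ih, pv_join_nil_cons]
    simp [pv_join_nil_eq_flatten, List.append_assoc]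

theorem pv_foldl_th (hs : List (List Char)) (s : List Char) :
    hs.foldl (fun acc h => acc ++ pvThOpen ++ h ++ pvThClose) s
      = s ++ PySem.Chars.join [] (hs.map (fun h => pvThOpen ++ h ++ pvThClose)) := by
  induction hs generalizing s with
  | nil => simp [PySem.Chars.join_nil]
  | cons x xs ih =>
    simp only [List.foldl_cons, List.map_cons, ih, pv_join_nil_cons]
    simp [pv_join_nil_eq_flatten, List.append_assoc]

theorem pv_foldl_rows (rs : List (List Char)) (s : List Char) :
    rs.foldl (fun acc row =>
        (((PySem.Chars.splitOn (PySem.Chars.stripChars (PySem.Chars.strip row) ['|']) ['|']).map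
            PySem.Chars.strip).foldl (fun a c => a ++ pvTdOpen ++ c ++ pvTdClose) (acc ++ pvTrOpen))
          ++ pvTrClose) s
      = s ++ PySem.Chars.join [] (rs.map (fun r =>
          pvTrOpen ++ PySem.Chars.join [] ((pvCells r).map (fun c => pvTdOpen ++ c ++ pvTdClose)) ++ pvTrClose)) := by
  induction rs generalizing s with
  | nil => simp [PySem.Chars.join_nil]
  | cons x xs ih =>
    simp only [List.foldl_cons, List.map_cons, pv_join_nil_cons, pv_foldl_td]
    simp [pvCells, pv_join_nil_eq_flatten, List.append_assoc]

theorem pvTableHtmlA_eq (r0 : List Char) (rs : List (List Char)) :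
    pvTableHtmlA r0 rs =
      pvTableOpen ++ pvTheadOpen
        ++ PySem.Chars.join [] (((pvCells r0).filter (fun h => !h.isEmpty)).map
              (fun h => pvThOpen ++ h ++ pvThClose))
        ++ pvTheadClose
        ++ PySem.Chars.join [] (rs.map (fun r =>
              pvTrOpen ++ PySem.Chars.join [] ((pvCells r).map (fun c => pvTdOpen ++ c ++ pvTdClose)) ++ pvTrClose))
        ++ pvTbodyClose := by
  have hdr : (pvCells r0).filter (fun h => !h.isEmpty)
      = ((PySem.Chars.splitOn (PySem.Chars.stripChars (PySem.Chars.strip r0) ['|']) ['|']).filter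
          (fun h => !(PySem.Chars.strip h).isEmpty)).map PySem.Chars.strip := by
    unfold pvCells
    rw [List.filter_map]
    rfl
  rw [show pvTableHtmlA r0 rs =
      ((rs.foldl (fun acc row =>
          (((PySem.Chars.splitOn (PySem.Chars.stripChars (PySem.Chars.strip row) ['|']) ['|']).map
              PySem.Chars.strip).foldl (fun a c => a ++ pvTdOpen ++ c ++ pvTdClose) (acc ++ pvTrOpen))
            ++ pvTrClose)
        (((((PySem.Chars.splitOn (PySem.Chars.stripChars (PySem.Chars.strip r0) ['|']) ['|']).filter
            (fun h => !(PySem.Chars.strip h).isEmpty)).map PySem.Chars.strip).foldl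
          (fun acc h => acc ++ pvThOpen ++ h ++ pvThClose) (pvTableOpen ++ pvTheadOpen)) ++ pvTheadClose))
        ++ pvTbodyClose) from rfl]
  rw [pv_foldl_rows, pv_foldl_th, ← hdr]

-- flushing the leading table run of ls onto A's result for the remainder gives A's result for ls
theorem pvFlush_proc (ls : List (List Char)) :
    pvFlush (ls.takeWhile pvTable) (pvProcA (ls.dropWhile pvTable)) = pvProcA ls := by
  cases ls with
  | nil => rfl
  | cons l rest =>
    by_cases h : pvTable l = true
    · rw [List.takeWhile_cons_of_pos h, List.dropWhile_cons_of_pos h]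
      rw [show pvProcA (l :: rest) = (if pvTable l then
            let tl := l :: (pvCollect rest).1
            let rows := tl.filter (fun x => !pvSep x)
            match rows with
            | [] => tl ++ pvProcA (pvCollect rest).2
            | r0 :: rs => pvTableHtmlA r0 rs :: pvProcA (pvCollect rest).2
          else l :: pvProcA rest) from by rw [pvProcA]]
      simp only [h, if_true, pvCollect_eq]
      unfold pvFlush pvRender
      simp only [List.isEmpty_cons, Bool.false_eq_true, if_false]
      cases hrows : (l :: rest.takeWhile pvTable).filter (fun x => !pvSep x) with
      | nil => simp
      | cons r0 rs => simp [pvTableHtmlA_eq]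
    · rw [List.takeWhile_cons_of_neg h, List.dropWhile_cons_of_neg h]
      rfl

-- the loop invariant of B's right fold
theorem pvFoldB_inv (ls : List (List Char)) :
    (ls.foldr pvStepB ([], [])).1 = ls.takeWhile pvTable ∧
    (ls.foldr pvStepB ([], [])).2 = pvProcA (ls.dropWhile pvTable) := by
  induction ls with
  | nil => exact ⟨rfl, by simp [pvProcA]⟩
  | cons l rest ih =>
    obtain ⟨h1, h2⟩ := ih
    by_cases h : pvTable l = true
    · constructor
      · simp [List.foldr_cons, pvStepB, h, h1]
      · simp [List.foldr_cons, pvStepB, h, h2]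
    · have hp : pvProcA (l :: rest) = l :: pvProcA rest := by
        rw [pvProcA, if_neg h]
      refine ⟨by simp [List.foldr_cons, pvStepB, h], ?_⟩
      simp only [List.foldr_cons, pvStepB, h, Bool.false_eq_true, if_false,
        List.dropWhile_cons, hp]
      rw [h1, h2, pvFlush_proc]

theorem pvB_eq_A (ls : List (List Char)) :
    pvFlush (ls.foldr pvStepB ([], [])).1 (ls.foldr pvStepB ([], [])).2 = pvProcA ls := by
  rw [(pvFoldB_inv ls).1, (pvFoldB_inv ls).2, pvFlush_proc]

-- ===== VERDICT (by name: the statement is the Claim_ definition above) =====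
theorem markdown_table_to_html_py_spec : Claim_equal_markdown_table_to_html_py := by
  intro text _
  unfold Spec_markdown_table_to_html_py markdown_table_to_html_py markdown_table_to_html_py_alt
  simp only []
  rw [pvB_eq_A]
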